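-- pv_equiv track=rewrite | github.com/maxritter/aws-bedrock-multi-agent-blueprint | src/tools/clinicaltrials/utils/helpers.py | truncate_response
-- ===== SOURCE A (Python) =====
-- MAX_RESPONSE_SIZE = 24 * 1024  # 24KB limit for responses
--
-- def truncate_response(text: str) -> str:
--     """Truncate response to stay within size limit while maintaining readability."""
--     if not text or len(text.encode("utf-8")) <= MAX_RESPONSE_SIZE:
--         return text
--     lines = text.split("\n")
--     result = []
--     current_size = 0
--
--     for line in lines:
--         line_size = len((line + "\n").encode("utf-8"))
--         if current_size + line_size > MAX_RESPONSE_SIZE: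
--             result.append("... (Response truncated due to size limit)")
--             break
--         result.append(line)
--         current_size += line_size
--
--     return "\n".join(result)
-- ===== SOURCE B (Python) =====
-- MAX_RESPONSE_SIZE = 24 * 1024  # 24KB limit for responses
--
-- TRUNCATION_NOTICE = "... (Response truncated due to size limit)"
--
--
-- def truncate_response(text: str) -> str:
--     """Truncate response to stay within size limit while maintaining readability."""
--     if not text or len(text.encode("utf-8")) <= MAX_RESPONSE_SIZE:
--         return text
--     lines = text.split("\n")
--     # prefix-size table: cums[i] = byte size of lines[:i+1] joined with '\n', plus a trailing '\n'
--     cums = []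
--     total = 0
--     for line in lines:
--         total += len(line.encode("utf-8")) + 1
--         cums.append(total)
--     # keep exactly the lines whose cumulative size stays within the limit
--     cutoff = sum(1 for c in cums if c <= MAX_RESPONSE_SIZE)
--     return "\n".join(lines[:cutoff] + [TRUNCATION_NOTICE])
-- ===== Notes on version B (the rewrite author's own statement) =====
-- stated objective: alternative
-- what changed: Replaces A's stateful append-until-break loop by a prefix-size table: build cumulative byte sizes once, count how many stay within the limit, then slice lines[:cutoff] and join with the notice appended.
import Mathlib
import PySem

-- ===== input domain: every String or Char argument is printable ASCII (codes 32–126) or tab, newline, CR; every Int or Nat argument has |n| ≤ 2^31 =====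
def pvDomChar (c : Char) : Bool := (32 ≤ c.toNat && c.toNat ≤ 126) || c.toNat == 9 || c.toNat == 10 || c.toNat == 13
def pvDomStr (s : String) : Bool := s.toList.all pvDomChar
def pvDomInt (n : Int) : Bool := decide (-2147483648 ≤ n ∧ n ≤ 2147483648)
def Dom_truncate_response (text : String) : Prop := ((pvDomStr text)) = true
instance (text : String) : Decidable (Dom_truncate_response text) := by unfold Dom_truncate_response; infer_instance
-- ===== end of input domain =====

-- B replaces A's stateful append-until-break loop by a prefix-size table (cumulative sizes,
-- count those within the limit, slice and join) — objective: alternative decomposition, same cost.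
-- On the ASCII domain, len(line.encode("utf-8")) is the character count (PySem.Str.len) — exact here.

-- ===== PORT A =====
-- the 'for line in lines:' loop of A, with its break-with-message
def truncateLoop : List String → Int → List String → List String
  | [], _, result => result
  | line :: rest, currentSize, result =>
    let lineSize := PySem.Str.len line + 1
    if 24576 < currentSize + lineSize then
      result ++ ["... (Response truncated due to size limit)"]
    else truncateLoop rest (currentSize + lineSize) (result ++ [line])

def truncate_response (text : String) : String :=
  if text = "" ∨ PySem.Str.len text ≤ 24576 then text
  else PySem.Str.join "\n" (truncateLoop ((PySem.Str.split? text "\n").getD []) 0 [])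

-- ===== PORT B =====
def truncate_response_alt (text : String) : String :=
  if text = "" ∨ PySem.Str.len text ≤ 24576 then text
  else
    let lines := (PySem.Str.split? text "\n").getD []
    -- prefix-size table built in one pass (total, cums)
    let st := lines.foldl
      (fun (st : Int × List Int) line =>
        (st.1 + (PySem.Str.len line + 1), st.2 ++ [st.1 + (PySem.Str.len line + 1)])) (0, [])
    let cutoff := st.2.countP (fun c => decide (c ≤ 24576))
    PySem.Str.join "\n" (lines.take cutoff ++ ["... (Response truncated due to size limit)"])

-- ===== PRECONDITION & SPEC =====
def Spec_truncate_response (text : String) (out : String) : Prop := out = truncate_response_alt text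
instance (text : String) (out : String) : Decidable (Spec_truncate_response text out) := by unfold Spec_truncate_response; infer_instance

-- ===== CLAIM (what is proved, stated in full; the proofs are below) =====
def Claim_equal_truncate_response : Prop := ∀ (text : String), Dom_truncate_response text → Spec_truncate_response text (truncate_response text)

-- ===== LEMMAS AND PROOFS =====

-- clean structural specification of Python's s.split("\n")
def mySplit : List Char → List (List Char)
  | [] => [[]]
  | c :: rest => if c = '\n' then [] :: mySplit rest else (mySplit rest).modifyHead (c :: ·)

theorem mySplit_ne_nil (l : List Char) : mySplit l ≠ [] := by
  cases l with
  | nil => simp [mySplit]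
  | cons c rest =>
    simp only [mySplit]
    split_ifs <;> simp [List.modifyHead]
    cases h : mySplit rest with
    | nil => exact absurd h (mySplit_ne_nil rest)
    | cons a t => simp

theorem splitOn_go_nil (f : Nat) (cur : List Char) (acc : List (List Char)) :
    PySem.Chars.splitOn.go ['\n'] f [] cur acc = (cur.reverse :: acc).reverse := by
  cases f <;> rw [PySem.Chars.splitOn.go] <;> simp

theorem splitOn_go_step (f : Nat) (c : Char) (rest cur : List Char) (acc : List (List Char)) :
    PySem.Chars.splitOn.go ['\n'] (f + 1) (c :: rest) cur acc =
      if c = '\n' then PySem.Chars.splitOn.go ['\n'] f rest [] (cur.reverse :: acc)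
      else PySem.Chars.splitOn.go ['\n'] f rest (c :: cur) acc := by
  rw [PySem.Chars.splitOn.go]
  by_cases h : c = '\n' <;> simp [List.isPrefixOf, h]
  exact fun e => absurd e.symm h

theorem splitOn_go_spec (l : List Char) : ∀ (fuel : Nat) (cur : List Char) (acc : List (List Char)),
    l.length ≤ fuel →
    PySem.Chars.splitOn.go ['\n'] fuel l cur acc
      = acc.reverse ++ (mySplit l).modifyHead (cur.reverse ++ ·) := by
  induction l with
  | nil =>
    intro fuel cur acc _
    rw [splitOn_go_nil]
    simp [mySplit]
  | cons c rest ih =>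
    intro fuel cur acc hf
    cases fuel with
    | zero => simp at hf
    | succ f =>
      rw [splitOn_go_step]
      have hfr : rest.length ≤ f := by simpa using hf
      by_cases h : c = '\n'
      · rw [if_pos h, ih f [] (cur.reverse :: acc) hfr]
        cases hm : mySplit rest with
        | nil => exact absurd hm (mySplit_ne_nil rest)
        | cons a t => simp [mySplit, h, hm]
      · rw [if_neg h, ih f (c :: cur) acc hfr]
        cases hm : mySplit rest with
        | nil => exact absurd hm (mySplit_ne_nil rest)
        | cons a t => simp [mySplit, h, hm]

theorem splitOn_newline (s : List Char) :
    PySem.Chars.splitOn s ['\n'] = mySplit s := by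
  show PySem.Chars.splitOn.go ['\n'] (s.length + 1) s [] [] = _
  rw [splitOn_go_spec s (s.length + 1) [] [] (by omega)]
  cases hm : mySplit s with
  | nil => exact absurd hm (mySplit_ne_nil s)
  | cons a t => simp

-- total of (len p + 1) over the split parts is len s + 1
theorem mySplit_sizes (s : List Char) :
    ((mySplit s).map (fun p => (p.length : Int) + 1)).sum = (s.length : Int) + 1 := by
  induction s with
  | nil => simp [mySplit]
  | cons c rest ih =>
    simp only [mySplit]
    split_ifs with h
    · simp [ih]; ring
    · cases hm : mySplit rest with
      | nil => exact absurd hm (mySplit_ne_nil rest)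
      | cons a t =>
        rw [hm] at ih
        simp at ih ⊢
        omega

-- proof-side cumulative-size list
def cumsFrom : Int → List String → List Int
  | _, [] => []
  | cur, l :: rest => (cur + (PySem.Str.len l + 1)) :: cumsFrom (cur + (PySem.Str.len l + 1)) rest

theorem cumsFrom_mono (lines : List String) : ∀ (cur : Int) (x : Int),
    x ∈ cumsFrom cur lines → cur < x := by
  induction lines with
  | nil => intro cur x hx; simp [cumsFrom] at hx
  | cons l rest ih =>
    intro cur x hx
    simp only [cumsFrom, List.mem_cons] at hx
    have h0 : (0 : Int) ≤ PySem.Str.len l := by simp [PySem.Str.len]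
    rcases hx with rfl | hx
    · omega
    · have := ih _ _ hx; omega

def sumSizes (lines : List String) : Int := (lines.map (fun l => PySem.Str.len l + 1)).sum

-- B's fold builds exactly (cur + sumSizes lines, acc ++ cumsFrom cur lines)
theorem foldl_cums (lines : List String) : ∀ (cur : Int) (acc : List Int),
    lines.foldl
      (fun (st : Int × List Int) line =>
        (st.1 + (PySem.Str.len line + 1), st.2 ++ [st.1 + (PySem.Str.len line + 1)])) (cur, acc)
      = (cur + sumSizes lines, acc ++ cumsFrom cur lines) := by
  induction lines with
  | nil => intro cur acc; simp [sumSizes, cumsFrom]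
  | cons l rest ih =>
    intro cur acc
    simp only [List.foldl_cons, ih, cumsFrom, sumSizes, List.map_cons, List.sum_cons,
      Prod.mk.injEq]
    exact ⟨by ring, by simp⟩

-- the break-loop of A equals take-count-of-fitting-prefixes plus the notice
theorem truncateLoop_eq (lines : List String) : ∀ (cur : Int) (acc : List String),
    cur ≤ 24576 → 24576 < cur + sumSizes lines →
    truncateLoop lines cur acc
      = acc ++ (lines.take ((cumsFrom cur lines).countP (fun c => decide (c ≤ 24576)))
          ++ ["... (Response truncated due to size limit)"]) := by
  induction lines with
  | nil =>
    intro cur acc h1 h2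
    simp [sumSizes] at h2
    omega
  | cons l rest ih =>
    intro cur acc h1 h2
    simp only [truncateLoop, cumsFrom]
    by_cases hb : 24576 < cur + (PySem.Str.len l + 1)
    · rw [if_pos hb]
      have hcount : ((cur + (PySem.Str.len l + 1)) ::
          cumsFrom (cur + (PySem.Str.len l + 1)) rest).countP (fun c => decide (c ≤ 24576)) = 0 := by
        rw [List.countP_eq_zero]
        intro x hx
        simp only [List.mem_cons] at hx
        rcases hx with rfl | hx
        · simp only [decide_eq_true_eq]; omega
        · have := cumsFrom_mono rest _ _ hx
          simp only [decide_eq_true_eq]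
          omega
      rw [hcount]
      simp
    · rw [if_neg hb]
      have hsum : 24576 < (cur + (PySem.Str.len l + 1)) + sumSizes rest := by
        simp only [sumSizes, List.map_cons, List.sum_cons] at h2 ⊢
        omega
      rw [ih (cur + (PySem.Str.len l + 1)) (acc ++ [l]) (by omega) hsum]
      have : ((cur + (PySem.Str.len l + 1)) ::
          cumsFrom (cur + (PySem.Str.len l + 1)) rest).countP (fun c => decide (c ≤ 24576))
          = (cumsFrom (cur + (PySem.Str.len l + 1)) rest).countP (fun c => decide (c ≤ 24576)) + 1 := by
        rw [List.countP_cons]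
        have hd : (decide ((cur + (PySem.Str.len l + 1)) ≤ 24576)) = true := by
          simp only [decide_eq_true_eq]; omega
        rw [hd]
        simp
      rw [this]
      simp [List.take_succ_cons]

-- total size of the split lines, transferred to the String level
theorem sumSizes_split (text : String) :
    sumSizes ((PySem.Str.split? text "\n").getD []) = PySem.Str.len text + 1 := by
  have h : PySem.Str.split? text "\n"
      = some ((PySem.Chars.splitOn text.toList ['\n']).map String.ofList) := by
    simp [PySem.Str.split?, PySem.Chars.split?]
  rw [h]
  simp only [Option.getD_some, splitOn_newline, sumSizes, List.map_map]
  have : ((mySplit text.toList).map (String.ofList) |>.map (fun l => PySem.Str.len l + 1))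
      = (mySplit text.toList).map (fun p => (p.length : Int) + 1) := by
    simp [PySem.Str.len, Function.comp]
  rw [← List.map_map] at *
  rw [this, mySplit_sizes, PySem.Str.len]

-- ===== VERDICT (by name: the statement is the Claim_ definition above) =====
theorem truncate_response_spec : Claim_equal_truncate_response := by
  intro text _
  unfold Spec_truncate_response truncate_response truncate_response_alt
  by_cases hg : text = "" ∨ PySem.Str.len text ≤ 24576
  · rw [if_pos hg, if_pos hg]
  · rw [if_neg hg, if_neg hg]
    rw [not_or] at hg
    have hlen : 24576 < PySem.Str.len text := by omega
    have hsum : 24576 < (0 : Int) + sumSizes ((PySem.Str.split? text "\n").getD []) := by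
      rw [sumSizes_split]; omega
    rw [truncateLoop_eq _ 0 [] (by omega) hsum]
    show _ = PySem.Str.join "\n"
      (((PySem.Str.split? text "\n").getD []).take
          (((((PySem.Str.split? text "\n").getD []).foldl
            (fun (st : Int × List Int) line =>
              (st.1 + (PySem.Str.len line + 1), st.2 ++ [st.1 + (PySem.Str.len line + 1)])) (0, [])).2).countP
            (fun c => decide (c ≤ 24576)))
        ++ ["... (Response truncated due to size limit)"])
    rw [foldl_cums]
    simp
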